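-- pv_equiv track=rewrite | github.com/dcahn/ECE209AS_ComputationalRobotics | pursuers_value_iteration.py | board_to_indices
-- ===== SOURCE A (Python) =====
-- def board_to_indices(board):
--     # Make a grid of indices, where the index at each valid board location
--     # corresponds to a position index
--     # Also return a list of board locations corresponding to the position indices
--     pos_indices = []
--     pos_index = 0
--     pos_indices_to_loc = []
--     for x in range(len(board)):
--         pos_indices.append([])
--         for y in range(len(board[x])):
--             if board[x][y] == '|':
--                 pos_indices[x].append(-1)
--             else:
--                 pos_indices[x].append(pos_index)
--                 pos_indices_to_loc.append((x, y))
--                 pos_index += 1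
--     return pos_indices, pos_index, pos_indices_to_loc
-- ===== SOURCE B (Python) =====
-- def board_to_indices(board):
--     # Table-first two-pass version: list all valid locations, index them in a
--     # dict, then render the grid by lookup.
--     pos_indices_to_loc = [(x, y) for x, row in enumerate(board)
--                                  for y, cell in enumerate(row) if cell != '|']
--     loc_to_index = {loc: i for i, loc in enumerate(pos_indices_to_loc)}
--     pos_indices = [[loc_to_index.get((x, y), -1) for y, _ in enumerate(row)]
--                    for x, row in enumerate(board)]
--     return pos_indices, len(pos_indices_to_loc), pos_indices_to_loc
-- ===== Notes on version B (the rewrite author's own statement) =====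
-- stated objective: alternative
-- what changed: Replaces A's single stateful pass with a mutating counter by a table-first two-pass scheme: first list all valid locations, build a location-to-index dict from their enumeration, then render the index grid by dict lookup with -1 default.
import Mathlib
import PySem

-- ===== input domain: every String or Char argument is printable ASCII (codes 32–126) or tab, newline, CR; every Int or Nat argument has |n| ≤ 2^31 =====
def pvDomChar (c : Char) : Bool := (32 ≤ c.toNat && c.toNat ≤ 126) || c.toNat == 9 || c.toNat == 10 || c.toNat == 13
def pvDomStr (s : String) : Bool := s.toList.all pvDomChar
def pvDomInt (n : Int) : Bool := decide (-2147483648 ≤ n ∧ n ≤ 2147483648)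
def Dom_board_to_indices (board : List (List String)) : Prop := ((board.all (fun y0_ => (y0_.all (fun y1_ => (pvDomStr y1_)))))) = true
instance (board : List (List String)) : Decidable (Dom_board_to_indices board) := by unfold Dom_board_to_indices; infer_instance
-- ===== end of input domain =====

-- B replaces A's single stateful counter pass by a table-first two-pass scheme
-- (location list + index dict, then grid by lookup); objective: alternative.

-- ===== PORT A =====
-- inner loop of A: walks one row at column y, threading the global counter p
-- and appending to the grid row / location list exactly as A's loop body does
def pvRowA (x y p : Int) : List String → List Int × Int × List (Int × Int)
  | [] => ([], p, [])
  | c :: cs =>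
    if c = "|" then
      let r := pvRowA x (y + 1) p cs
      (-1 :: r.1, r.2.1, r.2.2)
    else
      let r := pvRowA x (y + 1) (p + 1) cs
      (p :: r.1, r.2.1, (x, y) :: r.2.2)

-- outer loop of A over the rows
def pvGoA (x p : Int) : List (List String) → List (List Int) × Int × List (Int × Int)
  | [] => ([], p, [])
  | row :: rest =>
    let r := pvRowA x 0 p row
    let g := pvGoA (x + 1) r.2.1 rest
    (r.1 :: g.1, g.2.1, r.2.2 ++ g.2.2)

def board_to_indices (board : List (List String)) : List (List Int) × Int × (List (Int × Int)) :=
  pvGoA 0 0 board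

-- ===== PORT B =====
def board_to_indices_alt (board : List (List String)) : List (List Int) × Int × (List (Int × Int)) :=
  let locs : List (Int × Int) :=
    (PySem.List.enumerate board).flatMap (fun xr =>
      (PySem.List.enumerate xr.2).filterMap (fun yc =>
        if yc.2 ≠ "|" then some (xr.1, yc.1) else none))
  let d : PySem.Dict (Int × Int) Int :=
    (PySem.List.enumerate locs).foldl (fun d il => d.insert il.2 il.1) PySem.Dict.empty
  let grid : List (List Int) :=
    (PySem.List.enumerate board).map (fun xr =>
      (PySem.List.enumerate xr.2).map (fun yc => d.getD (xr.1, yc.1) (-1)))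
  (grid, (locs.length : Int), locs)

-- ===== PRECONDITION & SPEC =====
def Spec_board_to_indices (board : List (List String)) (out : List (List Int) × Int × (List (Int × Int))) : Prop := out = board_to_indices_alt board
instance (board : List (List String)) (out : List (List Int) × Int × (List (Int × Int))) : Decidable (Spec_board_to_indices board out) := by unfold Spec_board_to_indices; infer_instance

-- ===== CLAIM (what is proved, stated in full; the proofs are below) =====
def Claim_equal_board_to_indices : Prop := ∀ (board : List (List String)), Dom_board_to_indices board → Spec_board_to_indices board (board_to_indices board)

-- ===== LEMMAS AND PROOFS =====

-- reference location lists
def pvRowLocs (x y : Int) : List String → List (Int × Int)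
  | [] => []
  | c :: cs => if c = "|" then pvRowLocs x (y + 1) cs else (x, y) :: pvRowLocs x (y + 1) cs

def pvLocsFrom (x : Int) : List (List String) → List (Int × Int)
  | [] => []
  | row :: rest => pvRowLocs x 0 row ++ pvLocsFrom (x + 1) rest

-- first-index lookup with accumulator, -1 if absent
def pvLook (k : Int × Int) : List (Int × Int) → Int → Int
  | [], _ => -1
  | a :: t, acc => if a = k then acc else pvLook k t (acc + 1)

theorem pvLook_nmem (k : Int × Int) (L : List (Int × Int)) (acc : Int) (h : k ∉ L) :
    pvLook k L acc = -1 := by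
  induction L generalizing acc with
  | nil => rfl
  | cons a t ih =>
    simp only [pvLook]
    rw [if_neg (by rintro rfl; exact h (List.mem_cons_self))]
    exact ih _ (fun hm => h (List.mem_cons_of_mem _ hm))

theorem pvLook_append (k : Int × Int) (P L : List (Int × Int)) (acc : Int) (h : k ∉ P) :
    pvLook k (P ++ L) acc = pvLook k L (acc + P.length) := by
  induction P generalizing acc with
  | nil => simp
  | cons a t ih =>
    simp only [List.cons_append, pvLook]
    rw [if_neg (by rintro rfl; exact h (List.mem_cons_self))]
    rw [ih _ (fun hm => h (List.mem_cons_of_mem _ hm))]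
    congr 1
    simp only [List.length_cons]
    push_cast
    ring

theorem pvRowLocs_mem (x y : Int) (cs : List String) (k : Int × Int) (h : k ∈ pvRowLocs x y cs) :
    k.1 = x ∧ y ≤ k.2 := by
  induction cs generalizing y with
  | nil => simp [pvRowLocs] at h
  | cons c t ih =>
    simp only [pvRowLocs] at h
    split at h
    · rcases ih (y + 1) h with ⟨h1, h2⟩; exact ⟨h1, by omega⟩
    · rcases List.mem_cons.1 h with rfl | hm
      · exact ⟨rfl, le_refl _⟩
      · rcases ih (y + 1) hm with ⟨h1, h2⟩; exact ⟨h1, by omega⟩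

theorem pvLocsFrom_mem (x : Int) (rest : List (List String)) (k : Int × Int)
    (h : k ∈ pvLocsFrom x rest) : x ≤ k.1 := by
  induction rest generalizing x with
  | nil => simp [pvLocsFrom] at h
  | cons row t ih =>
    simp only [pvLocsFrom, List.mem_append] at h
    rcases h with h | h
    · exact le_of_eq (pvRowLocs_mem x 0 row k h).1.symm
    · have := ih (x + 1) h; omega

theorem pvRowLocs_nodup (x y : Int) (cs : List String) : (pvRowLocs x y cs).Nodup := by
  induction cs generalizing y with
  | nil => simp [pvRowLocs]
  | cons c t ih =>
    simp only [pvRowLocs]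
    split
    · exact ih (y + 1)
    · refine List.Nodup.cons ?_ (ih (y + 1))
      intro hm
      have := (pvRowLocs_mem x (y + 1) t _ hm).2
      omega

theorem pvLocsFrom_nodup (x : Int) (rest : List (List String)) : (pvLocsFrom x rest).Nodup := by
  induction rest generalizing x with
  | nil => simp [pvLocsFrom]
  | cons row t ih =>
    simp only [pvLocsFrom]
    refine List.Nodup.append (pvRowLocs_nodup x 0 row) (ih (x + 1)) ?_
    intro k hk hk'
    have h1 := (pvRowLocs_mem x 0 row k hk).1
    have h2 := pvLocsFrom_mem (x + 1) t k hk'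
    omega

-- B's comprehensions compute the reference lists
theorem pvRowLocs_eq_filterMap (x : Int) (cs : List String) (y : Int) :
    (PySem.List.enumerate cs y).filterMap
      (fun yc => if yc.2 ≠ "|" then some (x, yc.1) else none) = pvRowLocs x y cs := by
  induction cs generalizing y with
  | nil => simp [pvRowLocs, PySem.List.enumerate_nil]
  | cons c t ih =>
    rw [PySem.List.enumerate_cons, List.filterMap_cons]
    by_cases h : c = "|"
    · simpa [pvRowLocs, h] using ih (y + 1)
    · simpa [pvRowLocs, h] using ih (y + 1)

theorem pvLocsFrom_eq_flatMap (rest : List (List String)) (x : Int) :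
    (PySem.List.enumerate rest x).flatMap
      (fun xr => (PySem.List.enumerate xr.2).filterMap
        (fun yc => if yc.2 ≠ "|" then some (xr.1, yc.1) else none)) = pvLocsFrom x rest := by
  induction rest generalizing x with
  | nil => simp [pvLocsFrom, PySem.List.enumerate_nil]
  | cons row t ih =>
    rw [PySem.List.enumerate_cons]
    simp only [List.flatMap_cons, pvLocsFrom]
    rw [ih, pvRowLocs_eq_filterMap]

-- dict built by inserting enumerated entries: lookup is first-index-or-default
theorem pvDictFold_getD (L : List (Int × Int)) (s : Int) (d : PySem.Dict (Int × Int) Int)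
    (k : Int × Int) (hnd : L.Nodup) :
    ((PySem.List.enumerate L s).foldl (fun d il => d.insert il.2 il.1) d).getD k (-1) =
      if k ∈ L then pvLook k L s else d.getD k (-1) := by
  induction L generalizing s d with
  | nil => simp [PySem.List.enumerate_nil]
  | cons a t ih =>
    rw [PySem.List.enumerate_cons]
    simp only [List.foldl_cons]
    rw [ih _ _ (List.Nodup.of_cons hnd)]
    have hat : a ∉ t := (List.nodup_cons.1 hnd).1
    by_cases hk : k ∈ t
    · have hne : a ≠ k := by rintro rfl; exact hat hk
      simp [hk, List.mem_cons, pvLook, hne]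
    · rw [if_neg hk]
      rw [PySem.Dict.getD_insert]
      by_cases hka : k = a
      · subst hka; simp [pvLook]
      · have : k ∉ a :: t := by simp [hka, hk]
        simp [hka, this]

-- A's counter and location outputs
theorem pvRowA_snd (x y p : Int) (cs : List String) :
    (pvRowA x y p cs).2 = (p + (pvRowLocs x y cs).length, pvRowLocs x y cs) := by
  induction cs generalizing y p with
  | nil => simp [pvRowA, pvRowLocs]
  | cons c t ih =>
    simp only [pvRowA, pvRowLocs]
    by_cases h : c = "|"
    · simp [h, ih]
    · simp [h, ih]
      ring

theorem pvGoA_snd (x p : Int) (rest : List (List String)) :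
    (pvGoA x p rest).2 = (p + (pvLocsFrom x rest).length, pvLocsFrom x rest) := by
  induction rest generalizing x p with
  | nil => simp [pvGoA, pvLocsFrom]
  | cons row t ih =>
    simp only [pvGoA, pvLocsFrom]
    rw [pvRowA_snd]
    simp [ih]
    ring

-- A's row values are lookups in the global location list
theorem pvRowA_fst (x : Int) (cs : List String) (y : Int) (P R : List (Int × Int))
    (hP : ∀ k ∈ P, k.1 < x ∨ (k.1 = x ∧ k.2 < y))
    (hR : ∀ k ∈ R, x < k.1) :
    (pvRowA x y (P.length : Int) cs).1 =
      (PySem.List.enumerate cs y).map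
        (fun yc => pvLook (x, yc.1) (P ++ (pvRowLocs x y cs ++ R)) 0) := by
  induction cs generalizing y P with
  | nil => simp [pvRowA, PySem.List.enumerate_nil]
  | cons c t ih =>
    rw [PySem.List.enumerate_cons]
    simp only [pvRowA, pvRowLocs, List.map_cons]
    have hxyP : ((x, y) : Int × Int) ∉ P := by
      intro hm
      have := hP _ hm
      simp at this
    by_cases h : c = "|"
    · rw [if_pos h, if_pos h]
      have hhead : pvLook (x, y) (P ++ (pvRowLocs x (y + 1) t ++ R)) 0 = -1 := by
        apply pvLook_nmem
        simp only [List.mem_append]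
        rintro (hm | hm | hm)
        · exact hxyP hm
        · have := (pvRowLocs_mem x (y + 1) t _ hm).2
          simp at this
        · have := hR _ hm
          simp at this
      rw [hhead]
      have hP2 : ∀ k ∈ P, k.1 < x ∨ (k.1 = x ∧ k.2 < y + 1) := by
        intro k hk
        rcases hP k hk with h' | ⟨h1, h2⟩
        · exact Or.inl h'
        · exact Or.inr ⟨h1, by omega⟩
      rw [ih (y + 1) P hP2]
    · rw [if_neg h, if_neg h]
      have hhead : pvLook (x, y) (P ++ (((x, y) :: pvRowLocs x (y + 1) t) ++ R)) 0 = (P.length : Int) := by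
        rw [pvLook_append _ _ _ _ hxyP]
        simp [pvLook]
      rw [hhead]
      have hP' : ∀ k ∈ P ++ [((x, y) : Int × Int)], k.1 < x ∨ (k.1 = x ∧ k.2 < y + 1) := by
        intro k hk
        rcases List.mem_append.1 hk with hm | hm
        · rcases hP k hm with h' | ⟨h1, h2⟩
          · exact Or.inl h'
          · exact Or.inr ⟨h1, by omega⟩
        · simp at hm
          subst hm
          exact Or.inr ⟨rfl, by omega⟩
      have harg : ((P.length : Int) + 1) = (((P ++ [((x, y) : Int × Int)]).length : Nat) : Int) := by
        simp
      rw [harg, ih (y + 1) (P ++ [(x, y)]) hP']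
      simp [List.append_assoc]

-- A's grid is B's grid: every cell is a lookup in the full location list
theorem pvGoA_fst (rest : List (List String)) (x : Int) (P : List (Int × Int))
    (hP : ∀ k ∈ P, k.1 < x) :
    (pvGoA x (P.length : Int) rest).1 =
      (PySem.List.enumerate rest x).map
        (fun xr => (PySem.List.enumerate xr.2).map
          (fun yc => pvLook (xr.1, yc.1) (P ++ pvLocsFrom x rest) 0)) := by
  induction rest generalizing x P with
  | nil => simp [pvGoA, PySem.List.enumerate_nil]
  | cons row t ih =>
    rw [PySem.List.enumerate_cons]
    simp only [pvGoA, pvLocsFrom, List.map_cons]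
    have hrow := pvRowA_fst x row 0 P (pvLocsFrom (x + 1) t)
      (fun k hk => Or.inl (hP k hk))
      (fun k hk => by have := pvLocsFrom_mem (x + 1) t k hk; omega)
    rw [hrow]
    have hcnt : (pvRowA x 0 (P.length : Int) row).2.1 = ((P ++ pvRowLocs x 0 row).length : Int) := by
      rw [pvRowA_snd]; push_cast [List.length_append]; ring
    rw [hcnt]
    have ih' := ih (x + 1) (P ++ pvRowLocs x 0 row)
      (fun k hk => by
        rcases List.mem_append.1 hk with hm | hm
        · have := hP k hm; omega
        · have := (pvRowLocs_mem x 0 row k hm).1; omega)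
    rw [ih']
    congr 1
    apply List.map_congr_left
    intro xr _
    apply List.map_congr_left
    intro yc _
    congr 1
    simp [List.append_assoc]

-- ===== VERDICT (by name: the statement is the Claim_ definition above) =====
theorem board_to_indices_spec : Claim_equal_board_to_indices := by
  intro board _
  unfold Spec_board_to_indices
  show pvGoA 0 0 board = board_to_indices_alt board
  simp only [board_to_indices_alt]
  simp only [pvLocsFrom_eq_flatMap]
  have hnd := pvLocsFrom_nodup 0 board
  have hlook : ∀ k : Int × Int,
      ((PySem.List.enumerate (pvLocsFrom 0 board)).foldl
        (fun d il => d.insert il.2 il.1) PySem.Dict.empty).getD k (-1) =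
      pvLook k (pvLocsFrom 0 board) 0 := by
    intro k
    rw [pvDictFold_getD _ _ _ _ hnd]
    by_cases hk : k ∈ pvLocsFrom 0 board
    · rw [if_pos hk]
    · rw [if_neg hk, pvLook_nmem _ _ _ hk]
      simp
  simp only [hlook]
  have hgrid := pvGoA_fst board 0 [] (by simp)
  simp only [List.length_nil, Nat.cast_zero, List.nil_append] at hgrid
  have hsnd := pvGoA_snd 0 0 board
  refine Prod.ext ?_ ?_
  · exact hgrid
  · rw [hsnd]
    simp
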